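-- pv_equiv track=rewrite | github.com/lei-jia-xing/voidcode | src/voidcode/cli/app.py | _normalize_click_argv
-- ===== SOURCE A (Python) =====
-- from collections.abc import Callable, Iterator, Sequence
--
-- def _normalize_click_argv(argv: Sequence[str] | None) -> list[str] | None:
--     if argv is None:
--         return None
--     normalized: list[str] = []
--     index = 0
--     while index < len(argv):
--         item = argv[index]
--         if item != "--skills":
--             normalized.append(item)
--             index += 1
--             continue
--         index += 1
--         while index < len(argv) and not argv[index].startswith("-"):
--             normalized.extend(("--skills", argv[index]))
--             index += 1
--     return normalized
-- ===== SOURCE B (Python) =====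
-- def _normalize_click_argv(argv):
--     if argv is None:
--         return None
--     normalized = []
--     in_skills = False
--     for item in argv:
--         if item == "--skills":
--             in_skills = True
--         elif in_skills and not item.startswith("-"):
--             normalized.extend(("--skills", item))
--         else:
--             in_skills = False
--             normalized.append(item)
--     return normalized
-- ===== Notes on version B (the rewrite author's own statement) =====
-- stated objective: idiomatic
-- what changed: Replaced the explicit-index while loop with a nested consuming inner while by a single flat for loop over argv carrying a boolean in_skills state flag.
import Mathlib
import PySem

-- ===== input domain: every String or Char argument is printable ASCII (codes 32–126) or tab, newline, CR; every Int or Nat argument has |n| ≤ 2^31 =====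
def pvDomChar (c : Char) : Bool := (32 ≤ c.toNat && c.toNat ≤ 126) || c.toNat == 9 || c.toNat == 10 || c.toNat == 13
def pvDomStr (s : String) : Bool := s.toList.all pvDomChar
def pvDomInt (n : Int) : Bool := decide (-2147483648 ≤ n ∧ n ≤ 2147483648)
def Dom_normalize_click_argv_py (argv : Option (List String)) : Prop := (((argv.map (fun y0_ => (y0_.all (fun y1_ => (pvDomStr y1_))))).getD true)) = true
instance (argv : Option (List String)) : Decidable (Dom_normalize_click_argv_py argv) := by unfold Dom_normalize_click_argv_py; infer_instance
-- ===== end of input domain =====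

-- B replaces A's explicit-index while loop with nested consuming inner loop by a
-- single flat pass carrying a boolean in_skills state flag (idiomatic; same cost).

-- ===== PORT A =====
-- inner while: consume non-dash tokens after "--skills", returning the emitted
-- pairs and the remaining suffix of argv
def pvInnerA (xs : List String) : List String × List String :=
  match xs with
  | [] => ([], [])
  | x :: rest =>
    if ¬ (PySem.Str.startswith x "-") then
      let p := pvInnerA rest
      ("--skills" :: x :: p.1, p.2)
    else ([], x :: rest)

lemma pvInnerA_len : ∀ xs : List String, (pvInnerA xs).2.length ≤ xs.length := by
  intro xs
  induction xs with
  | nil => simp [pvInnerA]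
  | cons x rest ih =>
    simp only [pvInnerA]
    split
    · exact Nat.le_succ_of_le ih
    · simp

-- outer while over the index, as recursion on the remaining suffix of argv
def pvGoA (xs : List String) : List String :=
  match xs with
  | [] => []
  | item :: rest =>
    if item ≠ "--skills" then item :: pvGoA rest
    else
      let p := pvInnerA rest
      p.1 ++ pvGoA p.2
termination_by xs.length
decreasing_by
  · simp
  · have := pvInnerA_len rest; simp; omega

def normalize_click_argv_py (argv : Option (List String)) : Option (List String) :=
  match argv with
  | none => none
  | some xs => some (pvGoA xs)

-- ===== PORT B =====
-- the single for loop over argv with the in_skills flag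
def pvGoB (inSkills : Bool) (xs : List String) : List String :=
  match xs with
  | [] => []
  | item :: rest =>
    if item == "--skills" then pvGoB true rest
    else if inSkills && !(PySem.Str.startswith item "-") then
      "--skills" :: item :: pvGoB inSkills rest
    else item :: pvGoB false rest

def normalize_click_argv_py_alt (argv : Option (List String)) : Option (List String) :=
  match argv with
  | none => none
  | some xs => some (pvGoB false xs)

-- ===== PRECONDITION & SPEC =====
def Spec_normalize_click_argv_py (argv : Option (List String)) (out : Option (List String)) : Prop := out = normalize_click_argv_py_alt argv
instance (argv : Option (List String)) (out : Option (List String)) : Decidable (Spec_normalize_click_argv_py argv out) := by unfold Spec_normalize_click_argv_py; infer_instance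

-- ===== CLAIM (what is proved, stated in full; the proofs are below) =====
def Claim_equal_normalize_click_argv_py : Prop := ∀ (argv : Option (List String)), Dom_normalize_click_argv_py argv → Spec_normalize_click_argv_py argv (normalize_click_argv_py argv)

-- ===== LEMMAS AND PROOFS =====
-- Joint invariant: A's outer loop equals B with the flag off, and A's inner loop
-- (pairs emitted ++ outer loop on the rest) equals B with the flag on.
lemma pvGo_main : ∀ (n : Nat) (xs : List String), xs.length ≤ n →
    pvGoA xs = pvGoB false xs ∧
    pvGoB true xs = (pvInnerA xs).1 ++ pvGoA (pvInnerA xs).2 := by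
  intro n
  induction n with
  | zero =>
    intro xs h
    have : xs = [] := List.eq_nil_of_length_eq_zero (Nat.le_zero.mp h)
    subst this
    simp [pvGoA, pvGoB, pvInnerA]
  | succ n ih =>
    intro xs h
    match xs with
    | [] => simp [pvGoA, pvGoB, pvInnerA]
    | x :: rest =>
      have hr : rest.length ≤ n := by simp at h; omega
      have ihr := ih rest hr
      constructor
      · by_cases hx : x = "--skills"
        · subst hx
          rw [pvGoA, pvGoB]
          simp only [ne_eq, not_true_eq_false, if_false, BEq.rfl, if_true]
          exact ihr.2.symm
        · rw [pvGoA, pvGoB]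
          have hbe : (x == "--skills") = false := by
            simp [hx]
          simp only [ne_eq, hx, not_false_eq_true, if_true, hbe, Bool.false_and,
            Bool.false_eq_true, if_false]
          rw [ihr.1]
      · by_cases hx : x = "--skills"
        · subst hx
          rw [pvGoB, pvInnerA]
          have hsw : PySem.Str.startswith "--skills" "-" = true := by decide
          simp only [BEq.rfl, if_true, hsw, not_true_eq_false, if_false]
          rw [pvGoA]
          simp only [ne_eq, not_true_eq_false, if_false]
          exact ihr.2
        · have hbe : (x == "--skills") = false := by simp [hx]
          by_cases hd : PySem.Str.startswith x "-" = true
          · rw [pvGoB, pvInnerA]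
            simp only [hbe, Bool.false_eq_true, if_false, hd, not_true_eq_false,
              Bool.true_and, Bool.not_true, Bool.and_false, if_false]
            rw [pvGoA]
            simp only [ne_eq, hx, not_false_eq_true, if_true, List.nil_append]
            rw [ihr.1]
          · have hd0 : PySem.Str.startswith x "-" = false := by
              simpa using hd
            rw [pvGoB, pvInnerA]
            simp only [hbe, Bool.false_eq_true, if_false, hd0, Bool.not_false,
              Bool.true_and, if_true, not_false_eq_true, List.cons_append]
            rw [ihr.2]

-- ===== VERDICT (by name: the statement is the Claim_ definition above) =====
theorem normalize_click_argv_py_spec : Claim_equal_normalize_click_argv_py := by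
  intro argv _
  unfold Spec_normalize_click_argv_py
  match argv with
  | none => rfl
  | some xs =>
    simp only [normalize_click_argv_py, normalize_click_argv_py_alt]
    exact congrArg some (pvGo_main xs.length xs (le_refl _)).1
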